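-- pv_equiv track=rewrite | github.com/HYE77/CodingTest | 프로그래머스/0/181913. 문자열 여러 번 뒤집기/문자열 여러 번 뒤집기.py | solution
-- ===== SOURCE A (Python) =====
-- def solution(my_string, queries):
--     for s, e in queries:
--         if s != 0 and e != len(my_string) - 1:
--             my_string = my_string[0:s] + my_string[s:e+1][::-1] + my_string[e+1:]
--         elif s == 0 and e != len(my_string) - 1:
--             my_string = my_string[s:e+1][::-1] + my_string[e+1:]
--         elif s != 0 and e == len(my_string) - 1:
--             my_string = my_string[0:s] + my_string[s:e+1][::-1]
--         else:
--             my_string = my_string[s:e+1][::-1]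
--     return my_string
-- ===== SOURCE B (Python) =====
-- def solution(my_string, queries):
--     if not queries:
--         return my_string
--     (s, e), *rest = queries
--     return solution(my_string[:s] + my_string[s:e+1][::-1] + my_string[e+1:], rest)
-- ===== Notes on version B (the rewrite author's own statement) =====
-- stated objective: simpler
-- what changed: B replaces A's iterative loop with a four-way branch on whether the cut points touch the string's ends by a recursion over the query list that applies one branch-free prefix + reversed-segment + suffix step per query (the empty-slice cases A special-cases are already handled by slice algebra).
import Mathlib
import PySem

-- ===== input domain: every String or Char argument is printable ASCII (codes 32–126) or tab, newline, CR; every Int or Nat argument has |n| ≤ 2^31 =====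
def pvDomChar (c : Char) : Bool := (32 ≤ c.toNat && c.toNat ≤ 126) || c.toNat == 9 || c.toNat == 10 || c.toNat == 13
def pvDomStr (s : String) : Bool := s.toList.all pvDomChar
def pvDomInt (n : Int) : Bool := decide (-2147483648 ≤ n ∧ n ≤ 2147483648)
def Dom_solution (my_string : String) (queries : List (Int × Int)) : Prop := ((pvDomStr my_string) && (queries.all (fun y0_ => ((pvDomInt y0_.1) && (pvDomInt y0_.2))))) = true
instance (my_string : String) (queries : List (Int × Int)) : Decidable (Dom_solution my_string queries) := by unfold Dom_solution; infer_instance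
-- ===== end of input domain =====

-- B replaces A's loop with a four-way branch per query by a recursion over the query list
-- applying one branch-free prefix + reversed-segment + suffix step ("simpler"; not faster).

-- ===== PORT A =====
-- one loop step of A: the four-way branch on (s, e), on the string as a list of code points
def pvStepA (cs : List Char) (s e : Int) : List Char :=
  let n : Int := cs.length
  if s ≠ 0 ∧ e ≠ n - 1 then
    PySem.List.slice cs (some 0) (some s)
      ++ ((PySem.List.slice? (PySem.List.slice cs (some s) (some (e + 1))) none none (-1)).getD [])
      ++ PySem.List.slice cs (some (e + 1)) none
  else if s = 0 ∧ e ≠ n - 1 then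
    ((PySem.List.slice? (PySem.List.slice cs (some s) (some (e + 1))) none none (-1)).getD [])
      ++ PySem.List.slice cs (some (e + 1)) none
  else if s ≠ 0 ∧ e = n - 1 then
    PySem.List.slice cs (some 0) (some s)
      ++ ((PySem.List.slice? (PySem.List.slice cs (some s) (some (e + 1))) none none (-1)).getD [])
  else
    (PySem.List.slice? (PySem.List.slice cs (some s) (some (e + 1))) none none (-1)).getD []

def solution (my_string : String) (queries : List (Int × Int)) : String :=
  String.ofList (queries.foldl (fun cs q => pvStepA cs q.1 q.2) my_string.toList)

-- ===== PORT B =====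
-- B's recursion: peel the first query, rewrite the string by the single slice formula
-- my_string[:s] + my_string[s:e+1][::-1] + my_string[e+1:], recurse on the rest
def solution_alt (my_string : String) (queries : List (Int × Int)) : String :=
  match queries with
  | [] => my_string
  | (s, e) :: rest =>
    let cs := my_string.toList
    solution_alt
      (String.ofList
        (PySem.List.slice cs none (some s)
          ++ ((PySem.List.slice? (PySem.List.slice cs (some s) (some (e + 1))) none none (-1)).getD [])
          ++ PySem.List.slice cs (some (e + 1)) none))
      rest

-- ===== PRECONDITION & SPEC =====
def Spec_solution (my_string : String) (queries : List (Int × Int)) (out : String) : Prop := out = solution_alt my_string queries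
instance (my_string : String) (queries : List (Int × Int)) (out : String) : Decidable (Spec_solution my_string queries out) := by unfold Spec_solution; infer_instance

-- ===== CLAIM (what is proved, stated in full; the proofs are below) =====
def Claim_equal_solution : Prop := ∀ (my_string : String) (queries : List (Int × Int)), Dom_solution my_string queries → Spec_solution my_string queries (solution my_string queries)

-- ===== LEMMAS AND PROOFS =====

theorem pvSlice_def (cs : List Char) (a b : Int) : PySem.List.slice cs (some a) (some b)
    = (cs.drop (PySem.List.clampIdx cs.length a)).take
        (PySem.List.clampIdx cs.length b - PySem.List.clampIdx cs.length a) := rfl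

theorem pvClampIdx_zero (n : Nat) : PySem.List.clampIdx n (0 : Int) = 0 := by
  simp

theorem pvSliceTo_def (cs : List Char) (b : Int) : PySem.List.slice cs none (some b)
    = cs.take (PySem.List.clampIdx cs.length b) := rfl

-- B's single step (the body of the formula) as a named value
def pvStepB (cs : List Char) (s e : Int) : List Char :=
  PySem.List.slice cs none (some s)
    ++ ((PySem.List.slice? (PySem.List.slice cs (some s) (some (e + 1))) none none (-1)).getD [])
    ++ PySem.List.slice cs (some (e + 1)) none

-- A's four branches all collapse to B's branch-free formula
theorem pvStepA_eq_stepB (cs : List Char) (s e : Int) : pvStepA cs s e = pvStepB cs s e := by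
  unfold pvStepA pvStepB
  simp only [pvSlice_def, PySem.List.slice_some_none, pvSliceTo_def,
    PySem.List.slice?_none_none_neg_one, Option.getD_some, pvClampIdx_zero,
    List.drop_zero, Nat.sub_zero]
  split_ifs with c1 c2 c3
  · rfl
  · rw [c2.1]
    simp
  · have he : e + 1 = ((cs.length : Nat) : Int) := by omega
    have hc : PySem.List.clampIdx cs.length (e + 1) = cs.length := by
      rw [he, PySem.List.clampIdx_natCast]; simp
    rw [hc, List.drop_length]; simp
  · have hs0 : s = 0 := by tauto
    have hen : e = (cs.length : Int) - 1 := by tauto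
    have he : e + 1 = ((cs.length : Nat) : Int) := by omega
    have hc : PySem.List.clampIdx cs.length (e + 1) = cs.length := by
      rw [he, PySem.List.clampIdx_natCast]; simp
    rw [hs0, hc, List.drop_length, pvClampIdx_zero]
    simp

-- ===== VERDICT (by name: the statement is the Claim_ definition above) =====
theorem solution_spec : Claim_equal_solution := by
  intro my_string queries _
  unfold Spec_solution solution
  have hgen : ∀ (qs : List (Int × Int)) (cs : List Char),
      String.ofList (qs.foldl (fun cs q => pvStepA cs q.1 q.2) cs)
        = solution_alt (String.ofList cs) qs := by
    intro qs
    induction qs with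
    | nil => intro cs; rfl
    | cons q rest ih =>
      intro cs
      obtain ⟨s, e⟩ := q
      simp only [List.foldl_cons, solution_alt]
      rw [pvStepA_eq_stepB]
      have hround : (String.ofList cs).toList = cs := by simp
      rw [hround, show (PySem.List.slice cs none (some s)
          ++ ((PySem.List.slice? (PySem.List.slice cs (some s) (some (e + 1))) none none (-1)).getD [])
          ++ PySem.List.slice cs (some (e + 1)) none) = pvStepB cs s e from rfl]
      exact ih (pvStepB cs s e)
  have h0 : my_string = String.ofList my_string.toList := by simp
  rw [hgen queries my_string.toList, ← h0]
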